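-- pv_equiv track=rewrite | github.com/DanieleSiri/adventofcode2020 | day 9/day9.py | compute
-- ===== SOURCE A (Python) =====
-- def compute(num_list):
--     valid_values = set()
--     for i in num_list:
--         for j in num_list:
--             # numbers can't be equal
--             if i == j:
--                 continue
--             valid_values.add(int(i) + int(j))
--     return valid_values
-- ===== SOURCE B (Python) =====
-- def compute(num_list):
--     uniques = list(dict.fromkeys(num_list))
--     valid_values = set()
--     for idx, x in enumerate(uniques):
--         for y in uniques[idx + 1:]:
--             valid_values.add(int(x) + int(y))
--     return valid_values
-- ===== Notes on version B (the rewrite author's own statement) =====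
-- stated objective: faster
-- what changed: B first dedupes the values (dict.fromkeys) and then visits each unordered pair exactly once via a triangular enumerate/slice pass, instead of A's full n×n double loop with an equality-skip branch.
import Mathlib
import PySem

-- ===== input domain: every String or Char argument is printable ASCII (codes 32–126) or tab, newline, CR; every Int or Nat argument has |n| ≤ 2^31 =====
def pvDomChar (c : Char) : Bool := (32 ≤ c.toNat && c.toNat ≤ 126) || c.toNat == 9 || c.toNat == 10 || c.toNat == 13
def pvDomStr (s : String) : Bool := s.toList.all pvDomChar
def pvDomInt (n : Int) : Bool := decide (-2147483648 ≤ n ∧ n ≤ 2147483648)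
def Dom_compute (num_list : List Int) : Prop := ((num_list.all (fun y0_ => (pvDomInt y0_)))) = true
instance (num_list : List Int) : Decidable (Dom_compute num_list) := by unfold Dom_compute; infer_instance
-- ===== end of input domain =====

-- B dedupes the values up front and visits each unordered pair once (triangular pass),
-- instead of A's full n×n double loop with an equality-skip; measurably faster by a constant factor.

-- ===== PORT A =====
def compute (num_list : List Int) : List Int :=
  num_list.foldl
    (fun valid_values i =>
      num_list.foldl
        (fun valid_values j =>
          if i = j then valid_values
          else PySem.Set.add valid_values (i + j))
        valid_values)
    PySem.Set.empty

-- ===== PORT B =====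
def compute_alt (num_list : List Int) : List Int :=
  let uniques := PySem.List.dedup num_list
  (PySem.List.enumerate uniques).foldl
    (fun valid_values p =>
      (PySem.List.slice uniques (some (p.1 + 1)) none).foldl
        (fun valid_values y => PySem.Set.add valid_values (p.2 + y))
        valid_values)
    PySem.Set.empty

-- ===== PRECONDITION & SPEC =====
def Spec_compute (num_list : List Int) (out : List Int) : Prop := out = compute_alt num_list
instance (num_list : List Int) (out : List Int) : Decidable (Spec_compute num_list out) := by unfold Spec_compute; infer_instance

-- ===== CLAIM (what is proved, stated in full; the proofs are below) =====
def Claim_equal_compute : Prop := ∀ (num_list : List Int), Dom_compute num_list → Spec_compute num_list (compute num_list)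

-- ===== LEMMAS AND PROOFS =====

-- A's inner loop over l for a fixed outer element i
def innerA (i : Int) (l : List Int) (s : PySem.Set Int) : PySem.Set Int :=
  l.foldl (fun s j => if i = j then s else PySem.Set.add s (i + j)) s

-- A's outer loop over l, inner loop over full
def outerA (l full : List Int) (s : PySem.Set Int) : PySem.Set Int :=
  l.foldl (fun s i => innerA i full s) s

-- B's triangular pass, in structural form: process head against tail, recurse on the tail
def Brec : List Int → PySem.Set Int → PySem.Set Int
  | [], s => s
  | x :: xs, s => Brec xs (xs.foldl (fun s y => PySem.Set.add s (x + y)) s)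

theorem innerA_mono {x : Int} {i : Int} {l : List Int} {s : PySem.Set Int}
    (hx : x ∈ s) : x ∈ innerA i l s := by
  induction l generalizing s with
  | nil => exact hx
  | cons j t ih =>
    simp only [innerA, List.foldl_cons] at *
    split
    · exact ih hx
    · exact ih ((PySem.Set.mem_add _ _ _).2 (Or.inl hx))

theorem outerA_mono {x : Int} {l full : List Int} {s : PySem.Set Int}
    (hx : x ∈ s) : x ∈ outerA l full s := by
  induction l generalizing s with
  | nil => exact hx
  | cons i t ih =>
    simp only [outerA, List.foldl_cons] at *
    exact ih (innerA_mono hx)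

theorem innerA_sum_mem {i j : Int} {l : List Int} {s : PySem.Set Int}
    (hj : j ∈ l) (hne : i ≠ j) : (i + j) ∈ innerA i l s := by
  induction l generalizing s with
  | nil => cases hj
  | cons a t ih =>
    simp only [innerA, List.foldl_cons]
    rcases List.mem_cons.1 hj with rfl | hj'
    · simp only [if_neg hne]
      exact innerA_mono ((PySem.Set.mem_add _ _ _).2 (Or.inr rfl))
    · split
      · exact ih hj'
      · exact ih hj'

theorem innerA_id {i : Int} {l : List Int} {s : PySem.Set Int}
    (h : ∀ j ∈ l, i ≠ j → (i + j) ∈ s) : innerA i l s = s := by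
  induction l with
  | nil => rfl
  | cons a t ih =>
    simp only [innerA, List.foldl_cons]
    by_cases hia : i = a
    · simp only [if_pos hia]
      exact ih (fun j hj hne => h j (List.mem_cons.2 (Or.inr hj)) hne)
    · simp only [if_neg hia, PySem.Set.add_of_mem (h a (List.mem_cons.2 (Or.inl rfl)) hia)]
      exact ih (fun j hj hne => h j (List.mem_cons.2 (Or.inr hj)) hne)

theorem outerA_sum_mem {i j : Int} {l full : List Int} {s : PySem.Set Int}
    (hi : i ∈ l) (hj : j ∈ full) (hne : i ≠ j) : (i + j) ∈ outerA l full s := by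
  induction l generalizing s with
  | nil => cases hi
  | cons a t ih =>
    simp only [outerA, List.foldl_cons]
    rcases List.mem_cons.1 hi with rfl | hi'
    · exact outerA_mono (innerA_sum_mem hj hne)
    · exact ih hi'

-- dropping inner-loop duplicates: the inner list may be replaced by its ordered dedup
theorem inner_eq (i : Int) (l : List Int) (s : PySem.Set Int) :
    innerA i l s = innerA i (PySem.Set.ofList l) s := by
  induction l using List.reverseRecOn generalizing s with
  | nil => rfl
  | append_singleton t x ih =>
    have hsplit : innerA i (t ++ [x]) s = innerA i [x] (innerA i t s) := by
      simp [innerA, List.foldl_append]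
    rw [hsplit, PySem.Set.ofList_append_singleton, PySem.Set.add_eq_ite]
    by_cases hx : x ∈ PySem.Set.ofList t
    · have hxl : x ∈ t := (PySem.Set.mem_ofList _ _).1 hx
      simp only [if_pos hx]
      rw [← ih]
      show (if i = x then innerA i t s else PySem.Set.add (innerA i t s) (i + x)) = innerA i t s
      by_cases hix : i = x
      · simp [hix]
      · simp only [if_neg hix, PySem.Set.add_of_mem (innerA_sum_mem hxl hix)]
    · simp only [if_neg hx]
      have : innerA i (PySem.Set.ofList t ++ [x]) s = innerA i [x] (innerA i (PySem.Set.ofList t) s) := by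
        simp [innerA, List.foldl_append]
      rw [this, ← ih]

-- dropping outer-loop duplicates
theorem outer_eq (l full : List Int) (s : PySem.Set Int) :
    outerA l full s = outerA (PySem.Set.ofList l) full s := by
  induction l using List.reverseRecOn generalizing s with
  | nil => rfl
  | append_singleton t x ih =>
    have hsplit : outerA (t ++ [x]) full s = innerA x full (outerA t full s) := by
      simp [outerA, List.foldl_append, innerA]
    rw [hsplit, PySem.Set.ofList_append_singleton, PySem.Set.add_eq_ite]
    by_cases hx : x ∈ PySem.Set.ofList t
    · have hxl : x ∈ t := (PySem.Set.mem_ofList _ _).1 hx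
      simp only [if_pos hx]
      rw [innerA_id (fun j hj hne => outerA_sum_mem hxl hj hne), ih]
    · simp only [if_neg hx]
      have : outerA (PySem.Set.ofList t ++ [x]) full s
          = innerA x full (outerA (PySem.Set.ofList t) full s) := by
        simp [outerA, List.foldl_append, innerA]
      rw [this, ih]

-- the inner list may be deduped pointwise through the outer loop
theorem outer_inner_dedup (l full : List Int) (s : PySem.Set Int) :
    outerA l full s = outerA l (PySem.Set.ofList full) s := by
  induction l generalizing s with
  | nil => rfl
  | cons a t ih =>
    simp only [outerA, List.foldl_cons]
    rw [← inner_eq]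
    exact ih _

-- a pairwise-distinct head can be dropped from the inner list once all its sums are present
theorem outer_drop_head {a : Int} {t : List Int} (l : List Int) (s : PySem.Set Int)
    (h : ∀ i ∈ l, (a + i) ∈ s) : outerA l (a :: t) s = outerA l t s := by
  induction l generalizing s with
  | nil => rfl
  | cons i r ih =>
    simp only [outerA, List.foldl_cons]
    have hstep : innerA i (a :: t) s = innerA i t s := by
      simp only [innerA, List.foldl_cons]
      by_cases hia : i = a
      · simp [hia]
      · have : (i + a) ∈ s := by
          rw [Int.add_comm]; exact h i (List.mem_cons.2 (Or.inl rfl))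
        simp only [if_neg hia, PySem.Set.add_of_mem this]
    rw [hstep]
    exact ih _ (fun x hx => innerA_mono (h x (List.mem_cons.2 (Or.inr hx))))

-- with no self-duplicate the equality guard never fires
theorem innerA_no_guard {a : Int} {l : List Int} (s : PySem.Set Int) (ha : a ∉ l) :
    innerA a l s = l.foldl (fun s y => PySem.Set.add s (a + y)) s := by
  induction l generalizing s with
  | nil => rfl
  | cons y t ih =>
    have hay : a ≠ y := fun h => ha (h ▸ List.mem_cons.2 (Or.inl rfl))
    simp only [innerA, List.foldl_cons, if_neg hay] at *
    exact ih _ (fun h => ha (List.mem_cons.2 (Or.inr h)))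

-- main correspondence: on a duplicate-free list the square pass equals the triangular pass
theorem main_eq (v : List Int) (hv : v.Nodup) (s : PySem.Set Int) :
    outerA v v s = Brec v s := by
  induction v generalizing s with
  | nil => rfl
  | cons a t ih =>
    have hat : a ∉ t := (List.nodup_cons.1 hv).1
    have ht : t.Nodup := (List.nodup_cons.1 hv).2
    have h1 : innerA a (a :: t) s = t.foldl (fun s y => PySem.Set.add s (a + y)) s := by
      simp only [innerA, List.foldl_cons]
      exact innerA_no_guard s hat
    have h2 : outerA (a :: t) (a :: t) s = outerA t (a :: t) (innerA a (a :: t) s) := by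
      simp [outerA]
    have hsums : ∀ i ∈ t, (a + i) ∈ t.foldl (fun s y => PySem.Set.add s (a + y)) s := by
      intro i hi
      rw [PySem.Set.mem_foldl_add]
      exact Or.inr ⟨i, hi, rfl⟩
    rw [h2, h1, outer_drop_head t _ hsums, ih ht]
    rfl

theorem enum_bridge (U : List Int) :
    ∀ (t : List Int) (k : Nat), U.drop k = t → ∀ s,
    (PySem.List.enumerate t (k : Int)).foldl
      (fun s p => (PySem.List.slice U (some (p.1 + 1)) none).foldl
        (fun s y => PySem.Set.add s (p.2 + y)) s) s
      = Brec t s := by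
  intro t
  induction t with
  | nil => intro k hk s; simp [PySem.List.enumerate_nil, Brec]
  | cons x xs ih =>
    intro k hk s
    rw [PySem.List.enumerate_cons]
    simp only [List.foldl_cons, Brec]
    have hslice : PySem.List.slice U (some ((k : Int) + 1)) none = xs := by
      have : ((k : Int) + 1) = ((k + 1 : Nat) : Int) := by push_cast; ring
      rw [this, PySem.List.slice_from_natCast]
      have := congrArg (List.drop 1) hk
      simpa [List.drop_drop] using this
    rw [hslice]
    have hk' : U.drop (k + 1) = xs := by
      have := congrArg (List.drop 1) hk
      simpa [List.drop_drop] using this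
    have := ih (k + 1) hk' ((xs.foldl (fun s y => PySem.Set.add s (x + y)) s))
    rw [show ((k : Int) + 1) = ((k + 1 : Nat) : Int) from by push_cast; ring]
    exact this

-- ===== VERDICT (by name: the statement is the Claim_ definition above) =====
theorem compute_spec : Claim_equal_compute := by
  intro num_list _
  unfold Spec_compute
  have hA : compute num_list = outerA num_list num_list PySem.Set.empty := rfl
  rw [hA, outer_eq, outer_inner_dedup,
      main_eq (PySem.Set.ofList num_list) (PySem.Set.nodup_ofList num_list)]
  have hB : compute_alt num_list
      = (PySem.List.enumerate (PySem.List.dedup num_list) (0 : Int)).foldl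
          (fun s p => (PySem.List.slice (PySem.List.dedup num_list) (some (p.1 + 1)) none).foldl
            (fun s y => PySem.Set.add s (p.2 + y)) s) PySem.Set.empty := rfl
  rw [hB]
  rw [show ((0 : Int)) = ((0 : Nat) : Int) from rfl]
  rw [enum_bridge (PySem.List.dedup num_list) (PySem.List.dedup num_list) 0 rfl]
  simp [PySem.List.dedup_eq_ofList]
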